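-- pv_equiv track=rewrite | github.com/kakaocloud-school-study/coding-test | lim/백트래킹/K개 중 하나를 N번 선택하기(Conditional) - 특정 조건에 맞게 k개 중에 1개를 n번 뽑기.py | sol
-- ===== SOURCE A (Python) =====
-- def sol(k, n):
--     answer = []
--     if n == 0:
--         return [[]]
--     subanswer = sol(k, n-1)
--     for num in range(1, k+1):
--         for sublist in subanswer:
--             if len(sublist) > 1 and sublist[0] == num and sublist[1] == num:
--                 continue
--             answer.append([num] + sublist)
--     return answer
-- ===== SOURCE B (Python) =====
-- def sol(k, n):
--     # Build all length-n sequences over 1..k by extending on the right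
--     # (itertools.product order = lexicographic), then filter out any
--     # sequence containing three consecutive equal values.
--     seqs = [[]]
--     for _ in range(n):
--         seqs = [s + [num] for s in seqs for num in range(1, k + 1)]
--     return [s for s in seqs
--             if all(not (a == b == c) for a, b, c in zip(s, s[1:], s[2:]))]
-- ===== Notes on version B (the rewrite author's own statement) =====
-- stated objective: alternative
-- what changed: Replaces A's recursion that prunes three-in-a-row prefixes while prepending one element per level with an iterative full Cartesian-product build (appending on the right, itertools.product order) followed by a single whole-sequence filter removing any three consecutive equal values.
import Mathlib
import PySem

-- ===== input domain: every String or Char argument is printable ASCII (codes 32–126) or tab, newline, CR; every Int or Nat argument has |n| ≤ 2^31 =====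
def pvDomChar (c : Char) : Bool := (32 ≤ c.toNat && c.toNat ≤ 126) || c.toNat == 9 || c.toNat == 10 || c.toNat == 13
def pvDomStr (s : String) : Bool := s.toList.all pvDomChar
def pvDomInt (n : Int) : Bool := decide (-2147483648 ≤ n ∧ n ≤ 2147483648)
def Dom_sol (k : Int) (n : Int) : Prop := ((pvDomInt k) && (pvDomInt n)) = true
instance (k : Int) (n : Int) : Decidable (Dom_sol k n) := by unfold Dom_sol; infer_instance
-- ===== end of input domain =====

-- B replaces A's pruned recursion by an iterative full Cartesian-product build followed by a single
-- whole-sequence filter (no three consecutive equal values); objective: alternative, same output order.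

-- ===== PORT A =====
-- A recurses on n (n-1 each call); with Pre_sol requiring 0 ≤ n this is recursion on n.toNat.
def solRec (k : Int) : Nat → List (List Int)
  | 0 => [[]]
  | m + 1 =>
    let subanswer := solRec k m
    (PySem.List.pyRange 1 (k + 1) 1).foldl (fun answer num =>
      subanswer.foldl (fun answer sublist =>
        if sublist.length > 1 && PySem.List.pyGet? sublist 0 == some num
            && PySem.List.pyGet? sublist 1 == some num then
          answer                                  -- continue
        else
          answer ++ [num :: sublist]) answer) []

def sol (k : Int) (n : Int) : List (List Int) := solRec k n.toNat

-- ===== PORT B =====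
-- seqs = [[]]; for _ in range(n): seqs = [s + [num] for s in seqs for num in range(1, k+1)]
-- return [s for s in seqs if all(not (a == b == c) for a, b, c in zip(s, s[1:], s[2:]))]
def sol_alt (k : Int) (n : Int) : List (List Int) :=
  let seqs := (PySem.List.pyRange 0 n 1).foldl
    (fun seqs _ =>
      seqs.flatMap (fun s => (PySem.List.pyRange 1 (k + 1) 1).map (fun num => s ++ [num])))
    [[]]
  seqs.filter (fun s =>
    (s.zip ((PySem.List.slice s (some 1) none).zip (PySem.List.slice s (some 2) none))).all
      (fun t => !(t.1 == t.2.1 && t.2.1 == t.2.2)))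

-- ===== PRECONDITION & SPEC =====
-- A recurses on n-1 with base case n == 0, so a negative n never terminates (RecursionError): excluded.
def Pre_sol (k : Int) (n : Int) : Prop := 0 ≤ n
instance (k : Int) (n : Int) : Decidable (Pre_sol k n) := by unfold Pre_sol; infer_instance
def pvWitness_sol : Int × Int := (2, 3)

def Spec_sol (k : Int) (n : Int) (out : List (List Int)) : Prop := out = sol_alt k n
instance (k : Int) (n : Int) (out : List (List Int)) : Decidable (Spec_sol k n out) := by unfold Spec_sol; infer_instance

-- ===== CLAIM (what is proved, stated in full; the proofs are below) =====
def Claim_equal_sol : Prop := ∀ (k : Int) (n : Int), Dom_sol k n → Pre_sol k n → Spec_sol k n (sol k n)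

-- ===== LEMMAS AND PROOFS =====

-- one cons-extension step (A's traversal order: new first element outermost)
def consStep (k : Int) (seqs : List (List Int)) : List (List Int) :=
  (PySem.List.pyRange 1 (k + 1) 1).flatMap (fun a => seqs.map (a :: ·))

-- one append-extension step (B's traversal order: new last element innermost)
def appStep (k : Int) (seqs : List (List Int)) : List (List Int) :=
  seqs.flatMap (fun s => (PySem.List.pyRange 1 (k + 1) 1).map (fun a => s ++ [a]))

-- "no three consecutive equal values", scanning from the front
def noT : List Int → Bool
  | a :: b :: c :: t => !(a == b && b == c) && noT (b :: c :: t)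
  | _ => true

theorem zip_all_eq_noT (s : List Int) :
    (s.zip ((s.drop 1).zip (s.drop 2))).all (fun t => !(t.1 == t.2.1 && t.2.1 == t.2.2)) = noT s := by
  induction s using noT.induct with
  | case1 a b c t ih => simpa [noT, List.all_cons] using congrArg (!(a == b && b == c) && ·) ih
  | case2 s h => cases s with
    | nil => rfl
    | cons a t => cases t with
      | nil => rfl
      | cons b u => cases u with
        | nil => rfl
        | cons c v => exact absurd rfl (h a b c v)

theorem not_beq_comm (x y z : Int) : (!(x == y && y == z)) = (!(y == x && z == x)) := by
  by_cases hxy : x = y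
  · subst hxy
    by_cases hyz : x = z
    · subst hyz; rfl
    · rw [beq_eq_false_iff_ne.mpr hyz, beq_eq_false_iff_ne.mpr (fun h => hyz h.symm)]
  · rw [beq_eq_false_iff_ne.mpr hxy, beq_eq_false_iff_ne.mpr (fun h => hxy h.symm)]
    rfl

theorem noT_cons (a : Int) (s : List Int) :
    noT (a :: s) =
      (!(s.length > 1 && PySem.List.pyGet? s 0 == some a && PySem.List.pyGet? s 1 == some a)
        && noT s) := by
  match s with
  | [] => rfl
  | [b] => simp [noT, PySem.List.pyGet?, PySem.List.pyIdx?]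
  | b :: c :: t =>
    have h0 : (0:Int) ≤ (t.length:Int) + 1 := by positivity
    simp only [noT, PySem.List.pyGet?, PySem.List.pyIdx?]
    norm_num [h0]
    have := not_beq_comm a b c
    simp only [Bool.not_and] at this
    rw [this]

-- A's double loop, flattened to one cons-extension step with a front filter
theorem solRec_succ_flatMap (k : Int) (m : Nat) :
    solRec k (m + 1) =
      (PySem.List.pyRange 1 (k + 1) 1).flatMap (fun num =>
        ((solRec k m).filter (fun s =>
          !(s.length > 1 && PySem.List.pyGet? s 0 == some num
              && PySem.List.pyGet? s 1 == some num))).map (num :: ·)) := by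
  show (PySem.List.pyRange 1 (k + 1) 1).foldl _ [] = _
  have inner : ∀ (num : Int) (acc : List (List Int)),
      (solRec k m).foldl (fun answer sublist =>
        if sublist.length > 1 && PySem.List.pyGet? sublist 0 == some num
            && PySem.List.pyGet? sublist 1 == some num then answer
        else answer ++ [num :: sublist]) acc
      = acc ++ ((solRec k m).filter (fun s =>
          !(s.length > 1 && PySem.List.pyGet? s 0 == some num
              && PySem.List.pyGet? s 1 == some num))).map (num :: ·) := by
    intro num acc
    rw [← PySem.List.foldl_append_if
      (fun s => !(s.length > 1 && PySem.List.pyGet? s 0 == some num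
          && PySem.List.pyGet? s 1 == some num)) (num :: ·) (solRec k m) acc]
    congr 1
    funext answer sublist
    by_cases h : (sublist.length > 1 && PySem.List.pyGet? sublist 0 == some num
        && PySem.List.pyGet? sublist 1 == some num) = true <;> simp [h]
  induction (PySem.List.pyRange 1 (k + 1) 1) using List.reverseRecOn with
  | nil => rfl
  | append_singleton l num ih =>
    rw [List.foldl_append, List.flatMap_append, ← ih, List.foldl_cons, List.foldl_nil,
      inner num, List.flatMap_singleton]

-- A computes the front-filtered cons-extensions = noT-filter of the full cons-extension tower
theorem solRec_eq_filter (k : Int) (m : Nat) :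
    solRec k m = ((consStep k)^[m] [[]]).filter noT := by
  induction m with
  | zero => rfl
  | succ m ih =>
    rw [solRec_succ_flatMap, ih, Function.iterate_succ_apply']
    show _ = (consStep k ((consStep k)^[m] [[]])).filter noT
    generalize (consStep k)^[m] [[]] = S
    unfold consStep
    rw [List.filter_flatMap]
    congr 1
    funext num
    rw [List.filter_map, List.filter_filter]
    congr 1
    exact List.filter_congr (fun s _ => by
      simp only [Function.comp]
      rw [noT_cons, Bool.and_comm])

-- the two one-step extensions commute
theorem consStep_appStep_comm (k : Int) (s : List (List Int)) :
    appStep k (consStep k s) = consStep k (appStep k s) := by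
  unfold consStep appStep
  simp only [List.flatMap_assoc, List.flatMap_map, List.map_flatMap, List.map_map,
    Function.comp_def, List.cons_append]

theorem iterate_app_eq_iterate_cons (k : Int) (m : Nat) :
    (appStep k)^[m] [[]] = (consStep k)^[m] [[]] := by
  induction m with
  | zero => rfl
  | succ m ih =>
    have comm : ∀ (j : Nat) (x : List (List Int)),
        appStep k ((consStep k)^[j] x) = (consStep k)^[j] (appStep k x) := by
      intro j
      induction j with
      | zero => intro x; rfl
      | succ j ihj =>
        intro x
        rw [Function.iterate_succ_apply', consStep_appStep_comm, ihj,
          Function.iterate_succ_apply']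
    calc (appStep k)^[m + 1] [[]]
        = appStep k ((appStep k)^[m] [[]]) := Function.iterate_succ_apply' _ _ _
      _ = appStep k ((consStep k)^[m] [[]]) := by rw [ih]
      _ = (consStep k)^[m] (appStep k [[]]) := comm m [[]]
      _ = (consStep k)^[m] (consStep k [[]]) := by
            congr 1
            have single : ∀ (l : List Int),
                List.map (fun a => [a]) l = List.flatMap (fun a => [[a]]) l := by
              intro l
              induction l with
              | nil => rfl
              | cons h t ih => simp [ih]
            simp [appStep, consStep, single]
      _ = (consStep k)^[m + 1] [[]] := (Function.iterate_succ_apply _ _ _).symm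

-- B's for-loop ignores the loop variable: it is iteration, length-of-range many times
theorem foldl_const_iterate {α β : Type} (f : α → α) (l : List β) (x : α) :
    l.foldl (fun s _ => f s) x = f^[l.length] x := by
  induction l generalizing x with
  | nil => rfl
  | cons b t ih => rw [List.foldl_cons, ih, List.length_cons, Function.iterate_succ_apply]

-- ===== VERDICT (by name: the statement is the Claim_ definition above) =====
theorem sol_spec : Claim_equal_sol := by
  intro k n _ hpre
  show sol k n = sol_alt k n
  unfold sol sol_alt
  have h1 : ∀ (s : List Int), PySem.List.slice s (some 1) none = s.drop 1 :=
    fun s => PySem.List.slice_from s (by norm_num)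
  have h2 : ∀ (s : List Int), PySem.List.slice s (some 2) none = s.drop 2 :=
    fun s => PySem.List.slice_from s (by norm_num)
  simp only [h1, h2]
  show solRec k n.toNat =
    ((PySem.List.pyRange 0 n 1).foldl (fun seqs _ => appStep k seqs) [[]]).filter _
  rw [foldl_const_iterate (appStep k), PySem.List.length_pyRange_one]
  have hn : (n - 0).toNat = n.toNat := by omega
  rw [hn, iterate_app_eq_iterate_cons, solRec_eq_filter]
  exact List.filter_congr (fun s _ => (zip_all_eq_noT s).symm)
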